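-- pv_equiv track=rewrite | github.com/whaleloops/interpoetry | src/data/pron_dict.py | _get_vowel
-- ===== SOURCE A (Python) =====
-- def _get_vowel(pinyin):
--     i = len(pinyin) - 1
--     if pinyin.endswith('N'):
--         i -= 1
--     if pinyin.endswith('NG'):
--         i -= 2
--     while i >= 0 and \
--             pinyin[i] in ['A', 'O', 'E', 'I', 'U', 'V']:
--         i -= 1
--     return pinyin[i+1 : ]
-- ===== SOURCE B (Python) =====
-- def _ok(s):
--     # s is a member of the language [AOEIUV]*(N|NG)?
--     i = 0
--     while i < len(s) and s[i] in 'AOEIUV':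
--         i += 1
--     return s[i:] in ('', 'N', 'NG')
--
--
-- def _get_vowel(pinyin):
--     # longest suffix of pinyin that is a member of [AOEIUV]*(N|NG)?
--     # (the empty suffix always qualifies, so the loop always returns)
--     for k in range(len(pinyin) + 1):
--         if _ok(pinyin[k:]):
--             return pinyin[k:]
-- ===== Notes on version B (the rewrite author's own statement) =====
-- stated objective: alternative
-- what changed: B drops A's backward coda-and-vowel stripping scan entirely: it searches from the left for the longest suffix of the input that is a member of the language [AOEIUV]*(N|NG)?, testing each suffix with a simple membership predicate (generate-and-test over suffixes instead of stripping from the right).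
import Mathlib
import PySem

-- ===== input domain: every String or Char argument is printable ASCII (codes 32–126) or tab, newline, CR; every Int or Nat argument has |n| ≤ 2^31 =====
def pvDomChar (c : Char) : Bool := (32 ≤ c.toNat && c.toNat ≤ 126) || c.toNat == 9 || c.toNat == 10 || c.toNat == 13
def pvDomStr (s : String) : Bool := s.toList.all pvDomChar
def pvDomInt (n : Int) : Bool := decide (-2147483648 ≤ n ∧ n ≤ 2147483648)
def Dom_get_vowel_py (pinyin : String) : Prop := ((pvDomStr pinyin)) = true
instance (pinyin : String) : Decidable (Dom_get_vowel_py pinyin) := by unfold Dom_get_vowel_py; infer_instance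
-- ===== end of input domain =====

-- B replaces A's backward coda-and-vowel stripping scan by a left-to-right recursive search
-- for the longest suffix in the language [AOEIUV]*(N|NG)? (alternative algorithm, same result).

-- ===== PORT A =====
-- the vowel list literal ['A', 'O', 'E', 'I', 'U', 'V'] of A
def pyVowelList : List Char := ['A', 'O', 'E', 'I', 'U', 'V']

-- A's while loop; fuel m = i + 1 (i = current index); returns final i + 1
def getVowelWhile (cs : List Char) : Nat → Nat
  | 0 => 0
  | n + 1 =>
    if (PySem.List.pyGet? cs (n : Int)).any (fun c => decide (c ∈ pyVowelList)) then
      getVowelWhile cs n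
    else n + 1

def get_vowel_py (pinyin : String) : String :=
  let cs := pinyin.toList
  let i0 : Int := (cs.length : Int) - 1
  let i1 : Int := if PySem.Str.endswith pinyin "N" then i0 - 1 else i0
  let i2 : Int := if PySem.Str.endswith pinyin "NG" then i1 - 2 else i1
  -- return pinyin[i+1:]
  String.mk (PySem.List.slice cs (some (((getVowelWhile cs (i2 + 1).toNat : Nat) : Int))) none)

-- ===== PORT B =====
-- _ok(s): while loop advancing i over leading vowels, then s[i:] in ('', 'N', 'NG')
def okWhile (s : List Char) : Nat → Nat → Nat
  | 0, i => i
  | f + 1, i =>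
    if decide (i < s.length) &&
        ((PySem.List.pyGet? s (i : Int)).any (fun c => ("AOEIUV".toList).contains c)) then
      okWhile s f (i + 1)
    else i

def okB (s : List Char) : Bool :=
  let i := okWhile s (s.length + 1) 0
  let u := PySem.List.slice s (some (i : Int)) none
  u == [] || u == ['N'] || u == ['N', 'G']

-- for k in range(len(pinyin)+1): if _ok(pinyin[k:]): return pinyin[k:]
-- fuel = number of remaining loop iterations; fuel 0 = loop exhausted (unreachable: '' is ok)
def getBfor (s : List Char) : Nat → Nat → List Char
  | 0, _ => []
  | f + 1, k =>
    let suf := PySem.List.slice s (some (k : Int)) none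
    if okB suf then suf else getBfor s f (k + 1)

def get_vowel_py_alt (pinyin : String) : String :=
  String.mk (getBfor pinyin.toList (pinyin.toList.length + 1) 0)

-- ===== PRECONDITION & SPEC =====
def Spec_get_vowel_py (pinyin : String) (out : String) : Prop := out = get_vowel_py_alt pinyin
instance (pinyin : String) (out : String) : Decidable (Spec_get_vowel_py pinyin out) := by unfold Spec_get_vowel_py; infer_instance

-- ===== CLAIM (what is proved, stated in full; the proofs are below) =====
def Claim_equal_get_vowel_py : Prop := ∀ (pinyin : String), Dom_get_vowel_py pinyin → Spec_get_vowel_py pinyin (get_vowel_py pinyin)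

-- ===== LEMMAS AND PROOFS =====

-- membership of the tuple literal ('', 'N', 'NG'), proof-side form
def pyInSet (s : List Char) : Bool := s == [] || s == ['N'] || s == ['N', 'G']

def isVowel (c : Char) : Bool := ("AOEIUV".toList).contains c

-- proof-side recursive reformulations of B's two loops
def okR : List Char → Bool
  | [] => pyInSet []
  | c :: t => if isVowel c then okR t else pyInSet (c :: t)

def getR : List Char → List Char
  | [] => []
  | c :: t => if okR (c :: t) then c :: t else getR t

theorem okR_eq (s : List Char) : okR s = pyInSet (s.dropWhile isVowel) := by
  induction s with
  | nil => rfl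
  | cons c t ih =>
    by_cases h : isVowel c = true
    · simp only [okR, List.dropWhile_cons, h, if_true, ih]
    · simp only [okR, List.dropWhile_cons, h, Bool.false_eq_true, if_false]

-- the while loop of _ok computes the length of the leading vowel run
theorem okWhile_eq (s : List Char) :
    ∀ fuel i, i ≤ s.length → s.length - i ≤ fuel →
      okWhile s fuel i = i + ((s.drop i).takeWhile isVowel).length := by
  intro fuel
  induction fuel with
  | zero =>
    intro i hi hf
    have : i = s.length := by omega
    subst this
    simp [okWhile]
  | succ f ih =>
    intro i hi hf
    by_cases hlt : i < s.length
    · have hget : PySem.List.pyGet? s (i : Int) = some s[i] := by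
        rw [PySem.List.pyGet?_natCast]; simp [hlt]
      have hdropc : s.drop i = s[i] :: s.drop (i + 1) := by
        rw [List.drop_eq_getElem_cons hlt]
      by_cases hv : isVowel s[i] = true
      · have hcond : (decide (i < s.length) &&
            ((PySem.List.pyGet? s (i : Int)).any (fun c => ("AOEIUV".toList).contains c))) = true := by
          rw [hget]; simp only [Option.any_some, decide_eq_true hlt, Bool.true_and]; exact hv
        rw [okWhile, hcond, if_pos rfl, ih (i + 1) (by omega) (by omega), hdropc,
          List.takeWhile_cons, if_pos hv]
        simp; omega
      · have hv' : isVowel s[i] = false := by simpa using hv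
        have hcond : (decide (i < s.length) &&
            ((PySem.List.pyGet? s (i : Int)).any (fun c => ("AOEIUV".toList).contains c))) = false := by
          rw [hget]; simp only [Option.any_some, decide_eq_true hlt, Bool.true_and]; exact hv'
        rw [okWhile, hcond]
        rw [hdropc, List.takeWhile_cons, if_neg hv]
        simp
    · have : i = s.length := by omega
      subst this
      have hcond : (decide (s.length < s.length) &&
          ((PySem.List.pyGet? s (s.length : Int)).any (fun c => ("AOEIUV".toList).contains c))) = false := by
        simp
      rw [okWhile, hcond]
      simp

-- drop (takeWhile length) is dropWhile
theorem drop_takeWhile_len (p : Char → Bool) (l : List Char) :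
    l.drop (l.takeWhile p).length = l.dropWhile p := by
  induction l with
  | nil => rfl
  | cons c t ih => by_cases h : p c <;> simp [List.takeWhile_cons, List.dropWhile_cons, h, ih]

-- the ported _ok equals the recursive reformulation
theorem okB_eq_okR (s : List Char) : okB s = okR s := by
  have h2 : PySem.List.slice s (some ((okWhile s (s.length + 1) 0 : Nat) : Int)) none
      = s.dropWhile isVowel := by
    rw [okWhile_eq s (s.length + 1) 0 (by omega) (by omega)]
    simp only [List.drop_zero, Nat.zero_add]
    rw [PySem.List.slice_from_natCast, drop_takeWhile_len]
  show (PySem.List.slice s (some ((okWhile s (s.length + 1) 0 : Nat) : Int)) none == [] ||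
      PySem.List.slice s (some ((okWhile s (s.length + 1) 0 : Nat) : Int)) none == ['N'] ||
      PySem.List.slice s (some ((okWhile s (s.length + 1) 0 : Nat) : Int)) none == ['N', 'G']) = okR s
  rw [h2, okR_eq]
  rfl

-- the ported for loop equals the recursive reformulation on the remaining suffix
theorem getBfor_eq_getR (s : List Char) :
    ∀ fuel k, k ≤ s.length → s.length - k < fuel →
      getBfor s fuel k = getR (s.drop k) := by
  intro fuel
  induction fuel with
  | zero => intro k hk hf; omega
  | succ f ih =>
    intro k hk hf
    rw [getBfor, PySem.List.slice_from_natCast, okB_eq_okR]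
    cases hd : s.drop k with
    | nil =>
      simp [okR, pyInSet, getR]
    | cons c t =>
      rw [getR]
      by_cases hok : okR (c :: t) = true
      · rw [hok, if_pos rfl, if_pos rfl]
      · have hok' : okR (c :: t) = false := by simpa using hok
        rw [hok', if_neg (by simp), if_neg (by simp)]
        have hklt : k < s.length := by
          by_contra h
          have : s.drop k = [] := List.drop_eq_nil_of_le (by omega)
          rw [this] at hd; exact absurd hd (by simp)
        have ht : s.drop (k + 1) = t := by
          rw [← List.tail_drop, hd]; rfl
        rw [ih (k + 1) (by omega) (by omega), ht]

-- A's vowel test and B's are the same predicate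
theorem vowel_pred_eq : (fun c : Char => decide (c ∈ pyVowelList)) = isVowel := by
  funext c
  simp [pyVowelList, isVowel, show "AOEIUV".toList = ['A', 'O', 'E', 'I', 'U', 'V'] from rfl]

theorem getVowelWhile_eq (cs : List Char) :
    ∀ m : Nat, m ≤ cs.length →
      getVowelWhile cs m = ((cs.take m).reverse.dropWhile isVowel).length := by
  intro m
  induction m with
  | zero => intro _; simp [getVowelWhile]
  | succ n ih =>
    intro h
    have hn : n < cs.length := by omega
    have hget : PySem.List.pyGet? cs (n : Int) = some cs[n] := by
      rw [PySem.List.pyGet?_natCast]; simp [hn]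
    have htake : (cs.take (n + 1)).reverse = cs[n] :: (cs.take n).reverse := by
      rw [List.take_succ]; simp [hn]
    rw [getVowelWhile, hget, htake]
    simp only [Option.any_some, vowel_pred_eq]
    by_cases hv : isVowel cs[n] = true
    · rw [if_pos hv, List.dropWhile_cons, if_pos hv, ih (by omega)]
    · have hlen : (cs[n] :: (cs.take n).reverse).length = n + 1 := by simp; omega
      rw [if_neg hv, List.dropWhile_cons, if_neg hv, hlen]

-- the two endswith tests of A are mutually exclusive
theorem not_both_codas (s : String) :
    PySem.Str.endswith s "NG" = true → PySem.Str.endswith s "N" = true → False := by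
  intro h2 h1
  rw [PySem.Str.endswith_eq, PySem.Chars.endswith_iff] at h2 h1
  obtain ⟨t2, ht2⟩ := h2
  obtain ⟨t1, ht1⟩ := h1
  have e2 : s.toList.getLast? = some 'G' := by
    rw [← ht2]; simp [show ("NG".toList) = ['N', 'G'] from rfl]
  have e1 : s.toList.getLast? = some 'N' := by
    rw [← ht1]; simp [show ("N".toList) = ['N'] from rfl]
  rw [e2] at e1; simp at e1

-- dropWhile of (p ++ rest) keeps at least rest plus p's non-vowel last char
theorem dropWhile_len_ge (p rest : List Char) (hp : p ≠ [])
    (hlast : ∀ c, p.getLast? = some c → isVowel c = false) :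
    (List.dropWhile isVowel (p ++ rest)).length ≥ rest.length + 1 := by
  induction p with
  | nil => exact absurd rfl hp
  | cons c t ih =>
    by_cases ht : t = []
    · subst ht
      have hc : isVowel c = false := hlast c (by rfl)
      simp [hc]
    · have hlast' : ∀ c', t.getLast? = some c' → isVowel c' = false := by
        intro c' hc'
        apply hlast c'
        cases t with
        | nil => exact absurd rfl ht
        | cons a b => rw [List.getLast?_cons_cons]; exact hc'
      by_cases hc : isVowel c = true
      · simpa [List.dropWhile_cons, hc] using ih ht hlast'
      · simp [hc]

-- a nonempty suffix has the same getLast? as the whole list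
theorem getLast?_of_suffix (u s : List Char) (h : u <:+ s) (hu : u ≠ []) :
    s.getLast? = u.getLast? := by
  obtain ⟨t, ht⟩ := h
  rw [← ht, List.getLast?_append_of_ne_nil _ hu]

-- okR succeeds on (all-vowel run) ++ coda for coda in the tuple set
theorem okR_run_coda (vrun coda : List Char) (hv : ∀ c ∈ vrun, isVowel c = true)
    (hcoda : pyInSet coda = true) : okR (vrun ++ coda) = true := by
  rw [okR_eq]
  have hdw : List.dropWhile isVowel (vrun ++ coda) = List.dropWhile isVowel coda := by
    induction vrun with
    | nil => rfl
    | cons c t ih =>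
      have hc := hv c (by simp)
      rw [List.cons_append, List.dropWhile_cons, if_pos hc]
      exact ih (fun x hx => hv x (by simp [hx]))
  rw [hdw]
  simp only [pyInSet, Bool.or_eq_true, beq_iff_eq] at hcoda
  rcases hcoda with (h | h) | h <;> subst h <;> rfl

-- okR fails on every strict extension p ++ rest (p nonempty ending in a non-vowel),
-- given two conditions that rule out the short set members
theorem okR_fail (p rest : List Char) (hp : p ≠ [])
    (hlast : ∀ c, p.getLast? = some c → isVowel c = false)
    (hN : (p ++ rest).getLast? = some 'N' → rest ≠ [])
    (hNG : (['N', 'G'] <:+ (p ++ rest)) → 2 ≤ rest.length) :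
    okR (p ++ rest) = false := by
  rw [okR_eq]
  have hsuf : List.dropWhile isVowel (p ++ rest) <:+ (p ++ rest) := List.dropWhile_suffix isVowel
  have hlen := dropWhile_len_ge p rest hp hlast
  set u := List.dropWhile isVowel (p ++ rest) with hu
  by_contra hok
  simp only [Bool.not_eq_false] at hok
  simp only [pyInSet, Bool.or_eq_true, beq_iff_eq] at hok
  rcases hok with (h | h) | h
  · rw [h] at hlen; simp at hlen
  · have hlastN : (p ++ rest).getLast? = some 'N' := by
      rw [getLast?_of_suffix u _ hsuf (by rw [h]; simp), h]; rfl
    have := hN hlastN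
    rw [h] at hlen
    simp at hlen
    rw [hlen] at this
    exact this rfl
  · have := hNG (by rw [← h]; exact hsuf)
    rw [h] at hlen; simp at hlen; omega

-- the generic descent: getR skips every position inside pre, then accepts rest
theorem getR_append (pre rest : List Char) (hok : okR rest = true)
    (hfail : ∀ q, q ≠ [] → q <:+ pre → okR (q ++ rest) = false) :
    getR (pre ++ rest) = rest := by
  induction pre with
  | nil =>
    simp only [List.nil_append]
    cases rest with
    | nil => rfl
    | cons c t => simp [getR, hok]
  | cons c t ih =>
    have hf : okR ((c :: t) ++ rest) = false :=
      hfail (c :: t) (by simp) (List.suffix_refl _)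
    rw [List.cons_append, getR, ← List.cons_append, hf]
    simp only [Bool.false_eq_true, if_false]
    exact ih (fun q hq hsuf => hfail q hq (hsuf.trans (List.suffix_cons _ _)))

-- suffix is preserved by appending on the right
theorem suffix_append_both {q pre x : List Char} (h : q <:+ pre) : q ++ x <:+ pre ++ x := by
  obtain ⟨t, ht⟩ := h
  exact ⟨t, by rw [← ht, List.append_assoc]⟩

-- core: getR on stem ++ coda returns (trailing vowel run of stem) ++ coda
theorem getR_main (stem coda : List Char)
    (hcoda : pyInSet coda = true)
    (hN : coda = [] → stem.getLast? ≠ some 'N')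
    (hNGs : coda = [] → ¬ (['N', 'G'] <:+ stem))
    (hcN : coda = ['N'] ∨ coda = ['N', 'G'] ∨ coda = []) :
    getR (stem ++ coda) = (stem.reverse.takeWhile isVowel).reverse ++ coda := by
  set pre := (stem.reverse.dropWhile isVowel).reverse with hpre
  set vrun := (stem.reverse.takeWhile isVowel).reverse with hvrun
  have hsplit : stem = pre ++ vrun := by
    rw [hpre, hvrun, ← List.reverse_append, List.takeWhile_append_dropWhile, List.reverse_reverse]
  have hvall : ∀ c ∈ vrun, isVowel c = true := by
    intro c hc
    rw [hvrun, List.mem_reverse] at hc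
    exact List.mem_takeWhile_imp hc
  have hplast : ∀ c, pre.getLast? = some c → isVowel c = false := by
    intro c hc
    rw [hpre, List.getLast?_reverse] at hc
    have hne : stem.reverse.dropWhile isVowel ≠ [] := by
      intro hcon; rw [hcon] at hc; simp at hc
    have hh := List.head_dropWhile_not isVowel hne
    rw [List.head?_eq_head hne] at hc
    have hce : c = (stem.reverse.dropWhile isVowel).head hne := by
      exact (Option.some_injective _ hc).symm
    rw [hce]
    exact hh
  conv_lhs => rw [hsplit, List.append_assoc]
  apply getR_append
  · exact okR_run_coda vrun coda hvall hcoda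
  · intro q hq hsuf
    have hqlast : ∀ c, q.getLast? = some c → isVowel c = false := by
      intro c hc
      apply hplast c
      have hpne : pre ≠ [] := fun hpe => hq (List.eq_nil_of_suffix_nil (hpe ▸ hsuf))
      rw [getLast?_of_suffix q pre hsuf hq]
      exact hc
    have hsub : q ++ (vrun ++ coda) <:+ stem ++ coda := by
      rw [hsplit, List.append_assoc]
      exact suffix_append_both hsuf
    apply okR_fail q (vrun ++ coda) hq hqlast
    · -- getLast? = 'N' → vrun ++ coda ≠ []
      intro hlastN
      rcases hcN with hc | hc | hc
      · subst hc; simp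
      · subst hc; simp
      · subst hc
        exfalso
        apply hN rfl
        have hsub' : q ++ (vrun ++ ([] : List Char)) <:+ stem := by simpa using hsub
        rw [getLast?_of_suffix _ _ hsub' (by simp [hq])]
        exact hlastN
    · -- ['N','G'] suffix → 2 ≤ (vrun ++ coda).length
      intro hng
      rcases hcN with hc | hc | hc
      · -- coda = ['N']: the string ends in 'N', an NG-suffix would force 'G'
        exfalso
        subst hc
        have h1 : (q ++ (vrun ++ ['N'])).getLast? = some 'G' := by
          rw [getLast?_of_suffix _ _ hng (by simp)]; rfl
        have h2 : (q ++ (vrun ++ ['N'])).getLast? = some 'N' := by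
          rw [← List.append_assoc, List.getLast?_append_of_ne_nil _ (by simp)]; rfl
        rw [h1] at h2
        simp at h2
      · subst hc; simp
      · exfalso
        subst hc
        apply hNGs rfl
        have hng' : ['N', 'G'] <:+ q ++ vrun := by simpa using hng
        have hsub' : q ++ vrun <:+ stem := by
          rw [hsplit]; exact suffix_append_both hsuf
        exact hng'.trans hsub'

-- drop (length of non-vowel prefix) on stem ++ coda gives vrun ++ coda
theorem drop_pre (stem coda : List Char) :
    (stem ++ coda).drop ((stem.reverse.dropWhile isVowel).length) =
      (stem.reverse.takeWhile isVowel).reverse ++ coda := by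
  have hsplit : stem = (stem.reverse.dropWhile isVowel).reverse ++ (stem.reverse.takeWhile isVowel).reverse := by
    rw [← List.reverse_append, List.takeWhile_append_dropWhile, List.reverse_reverse]
  conv_lhs => rw [hsplit]
  rw [List.append_assoc, List.drop_append_of_le_length (by simp)]
  simp

-- the full per-case equality
theorem get_vowel_py_eq (pinyin : String) :
    get_vowel_py pinyin = get_vowel_py_alt pinyin := by
  unfold get_vowel_py get_vowel_py_alt
  set cs := pinyin.toList with hcs
  rw [getBfor_eq_getR cs (cs.length + 1) 0 (by omega) (by omega), List.drop_zero]
  by_cases h2 : PySem.Str.endswith pinyin "NG" = true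
  · have h1 : PySem.Str.endswith pinyin "N" = false := by
      by_contra h; exact not_both_codas pinyin h2 (by simpa using h)
    have hsuf : ['N', 'G'] <:+ cs := by
      have := h2; rw [PySem.Str.endswith_eq, PySem.Chars.endswith_iff] at this
      simpa [hcs, show ("NG".toList) = ['N', 'G'] from rfl] using this
    obtain ⟨t, ht⟩ := hsuf
    have hlen : cs.length = t.length + 2 := by rw [← ht]; simp
    simp only [h1, h2, if_true, Bool.false_eq_true, if_false]
    have harith : (((cs.length : Int) - 1 - 2) + 1).toNat = t.length := by omega
    rw [harith, getVowelWhile_eq cs _ (by omega)]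
    have htk : cs.take t.length = t := by rw [← ht]; simp
    rw [htk, PySem.List.slice_from_natCast, ← ht, drop_pre]
    rw [getR_main t ['N', 'G'] (by rfl) (by simp) (by simp) (by simp)]
  · by_cases h1 : PySem.Str.endswith pinyin "N" = true
    · have hsuf : ['N'] <:+ cs := by
        have := h1; rw [PySem.Str.endswith_eq, PySem.Chars.endswith_iff] at this
        simpa [hcs, show ("N".toList) = ['N'] from rfl] using this
      obtain ⟨t, ht⟩ := hsuf
      have hlen : cs.length = t.length + 1 := by rw [← ht]; simp
      simp only [h1, h2, if_true, Bool.false_eq_true, if_false]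
      have harith : (((cs.length : Int) - 1 - 1) + 1).toNat = t.length := by omega
      rw [harith, getVowelWhile_eq cs _ (by omega)]
      have htk : cs.take t.length = t := by rw [← ht]; simp
      rw [htk, PySem.List.slice_from_natCast, ← ht, drop_pre]
      rw [getR_main t ['N'] (by rfl) (by simp) (by simp) (by simp)]
    · -- no coda: the string ends neither with 'N' nor with 'NG'
      simp only [h1, h2, Bool.false_eq_true, if_false]
      have harith : (((cs.length : Int) - 1) + 1).toNat = cs.length := by omega
      rw [harith, getVowelWhile_eq cs _ (le_refl _)]
      have htk : cs.take cs.length = cs := by simp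
      rw [htk, PySem.List.slice_from_natCast]
      have hN : cs.getLast? ≠ some 'N' := by
        intro hl
        have hfalse : PySem.Chars.endswith pinyin.toList ['N'] = false := by simpa using h1
        have htrue : PySem.Chars.endswith pinyin.toList ['N'] = true := by
          rw [PySem.Chars.endswith_iff]
          rcases List.eq_nil_or_concat cs with h | ⟨l, a, h⟩
          · rw [h] at hl; simp at hl
          · have ha : a = 'N' := by rw [h] at hl; simpa using hl
            refine ⟨l, ?_⟩
            rw [ha] at h
            rw [hcs] at h
            simpa [List.concat_eq_append] using h.symm
        rw [htrue] at hfalse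
        simp at hfalse
      have hNG : ¬ (['N', 'G'] <:+ cs) := by
        intro hl
        have hfalse : PySem.Chars.endswith pinyin.toList ['N', 'G'] = false := by simpa using h2
        have htrue : PySem.Chars.endswith pinyin.toList ['N', 'G'] = true := by
          rw [PySem.Chars.endswith_iff]
          obtain ⟨t, ht⟩ := hl
          exact ⟨t, ht⟩
        rw [htrue] at hfalse
        simp at hfalse
      have hmain := getR_main cs [] (by rfl) (fun _ => hN) (fun _ => hNG) (by simp)
      simp only [List.append_nil] at hmain
      rw [hmain]
      have hdrop := drop_pre cs []
      simp only [List.append_nil] at hdrop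
      rw [hdrop]

-- ===== VERDICT (by name: the statement is the Claim_ definition above) =====
theorem get_vowel_py_spec : Claim_equal_get_vowel_py := by
  intro pinyin _
  exact get_vowel_py_eq pinyin
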